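-- pv_equiv track=rewrite | github.com/tiraphap/EC627-Microeconometrics | scripts/convert_to_ipynb.py | is_section_separator
-- ===== SOURCE A (Python) =====
-- def is_section_separator(line):
--     """Check if a line is a section separator like # ====== or # ------"""
--     stripped = line.strip()
--     if not stripped.startswith('#'):
--         return False
--     after_hash = stripped[1:].strip()
--     if len(after_hash) >= 10 and all(c in '=-~' for c in after_hash):
--         return True
--     return False
-- ===== SOURCE B (Python) =====
-- def is_section_separator(line):
--     """Single-pass state machine: no intermediate stripped strings are built."""
--     state = 0  # 0: leading whitespace, 1: after '#', 2: in separator run, 3: trailing whitespace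
--     run = 0
--     for ch in line:
--         if state == 0:
--             if ch.isspace():
--                 continue
--             if ch != '#':
--                 return False
--             state = 1
--         elif state == 1:
--             if ch in '=-~':
--                 run = 1
--                 state = 2
--             elif not ch.isspace():
--                 return False
--         elif state == 2:
--             if ch in '=-~':
--                 run += 1
--             elif ch.isspace():
--                 state = 3
--             else:
--                 return False
--         else:
--             if not ch.isspace():
--                 return False
--     return run >= 10
-- ===== Notes on version B (the rewrite author's own statement) =====
-- stated objective: alternative
-- what changed: Replaces A's pipeline of intermediate strings (strip, slice, strip again, then an all() membership scan) with a single left-to-right four-state scan of the raw characters that builds no intermediate strings.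
import Mathlib
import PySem

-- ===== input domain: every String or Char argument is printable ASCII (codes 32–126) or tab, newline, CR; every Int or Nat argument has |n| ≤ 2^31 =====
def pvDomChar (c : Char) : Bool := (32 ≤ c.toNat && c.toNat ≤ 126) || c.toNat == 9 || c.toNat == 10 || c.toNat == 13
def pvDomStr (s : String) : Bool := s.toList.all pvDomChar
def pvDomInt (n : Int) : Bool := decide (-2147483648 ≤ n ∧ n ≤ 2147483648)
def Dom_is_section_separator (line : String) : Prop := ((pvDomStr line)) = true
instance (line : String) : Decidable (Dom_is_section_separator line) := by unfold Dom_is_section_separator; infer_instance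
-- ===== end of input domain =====

-- B replaces A's strip/slice/strip/all pipeline by a single-pass four-state scan of the
-- raw characters (no intermediate strings); same result, alternative structure.

-- shared helper: Python's  c in '=-~'  on a single character
def pvSep (c : Char) : Bool := c == '=' || c == '-' || c == '~'

-- ===== PORT A =====
def is_section_separator (line : String) : Bool :=
  let stripped := PySem.Str.strip line
  if !(PySem.Str.startswith stripped "#") then false
  else
    let after_hash := PySem.Chars.strip (PySem.List.slice stripped.toList (some 1) none)
    if decide (10 ≤ after_hash.length) && after_hash.all pvSep then true else false

-- ===== PORT B =====
-- the for-loop of Source B: state (0..3), run counter, remaining characters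
def pvAltLoop : Nat → Nat → List Char → Bool
  | _, run, [] => decide (10 ≤ run)
  | 0, run, c :: r =>
      if PySem.Chars.isspace c then pvAltLoop 0 run r
      else if c ≠ '#' then false
      else pvAltLoop 1 run r
  | 1, run, c :: r =>
      if pvSep c then pvAltLoop 2 1 r
      else if !(PySem.Chars.isspace c) then false
      else pvAltLoop 1 run r
  | 2, run, c :: r =>
      if pvSep c then pvAltLoop 2 (run + 1) r
      else if PySem.Chars.isspace c then pvAltLoop 3 run r
      else false
  | _ + 3, run, c :: r =>
      if !(PySem.Chars.isspace c) then false
      else pvAltLoop 3 run r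

def is_section_separator_alt (line : String) : Bool :=
  pvAltLoop 0 0 line.toList

-- ===== PRECONDITION & SPEC =====
def Spec_is_section_separator (line : String) (out : Bool) : Prop := out = is_section_separator_alt line
instance (line : String) (out : Bool) : Decidable (Spec_is_section_separator line out) := by unfold Spec_is_section_separator; infer_instance

-- ===== CLAIM (what is proved, stated in full; the proofs are below) =====
def Claim_equal_is_section_separator : Prop := ∀ (line : String), Dom_is_section_separator line → Spec_is_section_separator line (is_section_separator line)

-- ===== LEMMAS AND PROOFS =====

-- a separator character is not whitespace
theorem pvSep_not_ws {c : Char} (h : pvSep c = true) : PySem.Chars.isspace c = false := by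
  simp only [pvSep, Bool.or_eq_true, beq_iff_eq] at h
  rcases h with (h | h) | h <;> subst h <;> decide

-- rstrip past a non-whitespace head
theorem rstrip_cons_not_ws {c : Char} (v : List Char) (h : PySem.Chars.isspace c = false) :
    PySem.Chars.rstrip (c :: v) = c :: PySem.Chars.rstrip v := by
  simp only [PySem.Chars.rstrip, List.reverse_cons, List.dropWhile_append]
  by_cases hv : (List.dropWhile PySem.Chars.isspace v.reverse).isEmpty
  · simp [List.dropWhile, h, List.isEmpty_iff.mp hv]
  · simp [hv]

-- rstrip past any head when the tail contains a non-whitespace character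
theorem rstrip_cons_not_all {c : Char} {v : List Char}
    (h : ¬ ∀ x ∈ v, PySem.Chars.isspace x = true) :
    PySem.Chars.rstrip (c :: v) = c :: PySem.Chars.rstrip v := by
  have hne : List.dropWhile PySem.Chars.isspace v.reverse ≠ [] := by
    intro hnil
    exact h (fun x hx => List.dropWhile_eq_nil_iff.mp hnil x (List.mem_reverse.mpr hx))
  simp only [PySem.Chars.rstrip, List.reverse_cons, List.dropWhile_append,
    List.isEmpty_iff, if_neg hne, List.reverse_append, List.reverse_cons, List.reverse_nil,
    List.nil_append, List.cons_append]

theorem rstrip_eq_nil_iff (v : List Char) :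
    PySem.Chars.rstrip v = [] ↔ ∀ x ∈ v, PySem.Chars.isspace x = true := by
  simp [PySem.Chars.rstrip, List.dropWhile_eq_nil_iff]

theorem rstrip_idem (v : List Char) :
    PySem.Chars.rstrip (PySem.Chars.rstrip v) = PySem.Chars.rstrip v := by
  simp [PySem.Chars.rstrip, List.dropWhile_idempotent]

-- stripping after an rstrip is just stripping
theorem strip_rstrip (t : List Char) :
    PySem.Chars.strip (PySem.Chars.rstrip t) = PySem.Chars.strip t := by
  induction t with
  | nil => rfl
  | cons c v ih =>
    by_cases hall : ∀ x ∈ v, PySem.Chars.isspace x = true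
    · by_cases hc : PySem.Chars.isspace c = true
      · have hr : PySem.Chars.rstrip (c :: v) = [] := by
          rw [rstrip_eq_nil_iff]
          intro x hx
          rcases List.mem_cons.mp hx with rfl | hx
          · exact hc
          · exact hall x hx
        have hlv : List.dropWhile PySem.Chars.isspace v = [] :=
          List.dropWhile_eq_nil_iff.mpr hall
        have hs : PySem.Chars.strip (c :: v) = [] := by
          simp [PySem.Chars.strip, PySem.Chars.lstrip, hc, hlv, PySem.Chars.rstrip]
        rw [hr, hs]; rfl
      · have hc' : PySem.Chars.isspace c = false := by simpa using hc
        rw [rstrip_cons_not_ws v hc']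
        simp only [PySem.Chars.strip, PySem.Chars.lstrip, List.dropWhile_cons, hc']
        simp only [Bool.false_eq_true, if_false]
        rw [rstrip_cons_not_ws _ hc', rstrip_cons_not_ws _ hc', rstrip_idem]
    · by_cases hc : PySem.Chars.isspace c = true
      · rw [rstrip_cons_not_all hall]
        simp only [PySem.Chars.strip, PySem.Chars.lstrip, List.dropWhile_cons, hc, if_true]
        exact ih
      · have hc' : PySem.Chars.isspace c = false := by simpa using hc
        rw [rstrip_cons_not_ws v hc']
        simp only [PySem.Chars.strip, PySem.Chars.lstrip, List.dropWhile_cons, hc']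
        simp only [Bool.false_eq_true, if_false]
        rw [rstrip_cons_not_ws _ hc', rstrip_cons_not_ws _ hc', rstrip_idem]

-- state 3: only trailing whitespace may remain
theorem pvAltLoop_three (v : List Char) (r : Nat) :
    pvAltLoop 3 r v = (v.all PySem.Chars.isspace && decide (10 ≤ r)) := by
  induction v with
  | nil => simp [pvAltLoop]
  | cons c w ih =>
    by_cases hc : PySem.Chars.isspace c = true
    · simp [pvAltLoop, hc, ih]
    · simp [pvAltLoop, hc]

-- state 2: counts the separator run, then allows only trailing whitespace
theorem pvAltLoop_two (u : List Char) (r : Nat) :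
    pvAltLoop 2 r u =
      (decide (10 ≤ r + (PySem.Chars.rstrip u).length) &&
        (PySem.Chars.rstrip u).all pvSep) := by
  induction u generalizing r with
  | nil => simp [pvAltLoop, PySem.Chars.rstrip]
  | cons c v ih =>
    by_cases hs : pvSep c = true
    · rw [rstrip_cons_not_ws v (pvSep_not_ws hs)]
      simp only [pvAltLoop, hs, if_true, ih (r + 1), List.all_cons, List.length_cons,
        Bool.true_and]
      congr 1
      simp only [decide_eq_decide]
      omega
    · have hs' : pvSep c = false := by simpa using hs
      by_cases hc : PySem.Chars.isspace c = true
      · simp only [pvAltLoop, hs', Bool.false_eq_true, if_false, hc, if_true]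
        rw [pvAltLoop_three]
        by_cases hall : ∀ x ∈ v, PySem.Chars.isspace x = true
        · have h0 : PySem.Chars.rstrip (c :: v) = [] := by
            rw [rstrip_eq_nil_iff]
            intro x hx
            rcases List.mem_cons.mp hx with rfl | hx
            · exact hc
            · exact hall x hx
          rw [h0]
          simp [List.all_eq_true.mpr hall]
        · rw [rstrip_cons_not_all hall]
          have hva : v.all PySem.Chars.isspace = false := by
            rw [← Bool.not_eq_true]; simpa [List.all_eq_true] using hall
          simp [List.all_cons, hva, hs']
      · have hc' : PySem.Chars.isspace c = false := by simpa using hc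
        rw [rstrip_cons_not_ws v hc']
        simp [pvAltLoop, hs', hc']

-- state 1: equals A's check on the stripped remainder
theorem pvAltLoop_one (t : List Char) :
    pvAltLoop 1 0 t =
      (decide (10 ≤ (PySem.Chars.strip t).length) &&
        (PySem.Chars.strip t).all pvSep) := by
  induction t with
  | nil => simp [pvAltLoop, PySem.Chars.strip, PySem.Chars.lstrip, PySem.Chars.rstrip]
  | cons c v ih =>
    by_cases hs : pvSep c = true
    · have hc' : PySem.Chars.isspace c = false := pvSep_not_ws hs
      simp only [pvAltLoop, hs, if_true]
      rw [pvAltLoop_two]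
      simp only [PySem.Chars.strip, PySem.Chars.lstrip, List.dropWhile_cons, hc',
        Bool.false_eq_true, if_false]
      rw [rstrip_cons_not_ws _ hc']
      simp only [List.length_cons, List.all_cons, hs, Bool.true_and]
      congr 1
      simp only [decide_eq_decide]
      omega
    · have hs' : pvSep c = false := by simpa using hs
      by_cases hc : PySem.Chars.isspace c = true
      · simp only [pvAltLoop, hs', Bool.false_eq_true, if_false, hc, Bool.not_true]
        rw [ih]
        have hsv : PySem.Chars.strip (c :: v) = PySem.Chars.strip v := by
          simp [PySem.Chars.strip, PySem.Chars.lstrip, hc]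
        rw [hsv]
      · have hc' : PySem.Chars.isspace c = false := by simpa using hc
        simp only [pvAltLoop, hs', Bool.false_eq_true, if_false, hc', Bool.not_false, if_true]
        simp only [PySem.Chars.strip, PySem.Chars.lstrip, List.dropWhile_cons, hc',
          Bool.false_eq_true, if_false]
        rw [rstrip_cons_not_ws _ hc']
        simp [hs']

-- the whole-line equivalence, on the character list
theorem pv_main (l : List Char) :
    (let stripped := PySem.Chars.strip l
     if !(PySem.Chars.startswith stripped ['#']) then false
     else
       let after_hash := PySem.Chars.strip (PySem.List.slice stripped (some 1) none)
       if decide (10 ≤ after_hash.length) && after_hash.all pvSep then true else false) =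
    pvAltLoop 0 0 l := by
  induction l with
  | nil => simp [PySem.Chars.strip, PySem.Chars.lstrip, PySem.Chars.rstrip,
      PySem.Chars.startswith, pvAltLoop]
  | cons c v ih =>
    by_cases hc : PySem.Chars.isspace c = true
    · simp only [pvAltLoop, hc, if_true]
      rw [← ih]
      simp [PySem.Chars.strip, PySem.Chars.lstrip, hc]
    · have hc' : PySem.Chars.isspace c = false := by simpa using hc
      have hstrip : PySem.Chars.strip (c :: v) = c :: PySem.Chars.rstrip v := by
        simp only [PySem.Chars.strip, PySem.Chars.lstrip, List.dropWhile_cons, hc',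
          Bool.false_eq_true, if_false]
        exact rstrip_cons_not_ws _ hc'
      by_cases hh : c = '#'
      · subst hh
        simp only [hstrip, pvAltLoop, hc', Bool.false_eq_true, if_false, ne_eq,
          not_true_eq_false]
        have hpre : PySem.Chars.startswith ('#' :: PySem.Chars.rstrip v) ['#'] = true := by
          simp [PySem.Chars.startswith, List.isPrefixOf]
        rw [hpre]
        have hslice : PySem.List.slice ('#' :: PySem.Chars.rstrip v) (some 1) none =
            PySem.Chars.rstrip v := by
          simp [pysem]
        rw [hslice, strip_rstrip, pvAltLoop_one]
        rw [Bool.eq_iff_iff]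
        simp [List.all_eq_true]
      · have hpre : PySem.Chars.startswith (c :: PySem.Chars.rstrip v) ['#'] = false := by
          simp [PySem.Chars.startswith, List.isPrefixOf]
          exact fun h => hh h.symm
        simp [hstrip, hpre, pvAltLoop, hc', hh]

-- ===== VERDICT (by name: the statement is the Claim_ definition above) =====
theorem is_section_separator_spec : Claim_equal_is_section_separator := by
  intro line _
  unfold Spec_is_section_separator is_section_separator is_section_separator_alt
  rw [← pv_main line.toList]
  simp [pysem, PySem.Str.strip, PySem.Str.startswith]
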